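-- pv_equiv track=rewrite | github.com/Ryha-Technologies/ryha-ai-platform | src/agents/web_security/sql_injection_hunter/main.py | _function_bypass
-- ===== SOURCE A (Python) =====
-- def _function_bypass(payload: str) -> str:
--     """Use function alternatives to bypass WAF"""
--     replacements = {
--         "UNION": "UNION ALL",
--         "SELECT": "SELECT ALL",
--         "AND": "&&",
--         "OR": "||"
--     }
--     result = payload
--     for old, new in replacements.items():
--         result = result.replace(old, new)
--     return result
-- ===== SOURCE B (Python) =====
-- import re
--
-- _PATTERN = re.compile(r"UNION|SELECT|AND|OR")
-- _MAPPING = {"UNION": "UNION ALL", "SELECT": "SELECT ALL", "AND": "&&", "OR": "||"}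
--
-- def _function_bypass(payload: str) -> str:
--     """Use function alternatives to bypass WAF (single left-to-right scan)."""
--     return _PATTERN.sub(lambda m: _MAPPING[m.group(0)], payload)
-- ===== Notes on version B (the rewrite author's own statement) =====
-- stated objective: idiomatic
-- what changed: Replaced four sequential full-string str.replace passes by one regex substitution (alternation pattern UNION|SELECT|AND|OR with a mapping callback) that scans the payload once left-to-right.
import Mathlib
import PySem

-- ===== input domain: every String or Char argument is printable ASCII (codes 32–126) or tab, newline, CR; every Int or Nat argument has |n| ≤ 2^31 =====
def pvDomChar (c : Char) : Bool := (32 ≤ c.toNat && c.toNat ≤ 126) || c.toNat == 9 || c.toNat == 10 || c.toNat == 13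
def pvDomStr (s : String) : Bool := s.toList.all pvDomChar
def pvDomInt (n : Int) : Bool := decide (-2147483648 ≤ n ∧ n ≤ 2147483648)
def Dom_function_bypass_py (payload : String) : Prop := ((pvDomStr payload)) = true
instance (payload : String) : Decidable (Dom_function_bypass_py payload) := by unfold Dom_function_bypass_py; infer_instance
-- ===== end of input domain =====

-- B replaces A's four sequential str.replace passes by one left-to-right scan matching any keyword (the regex-alternation rewrite), same output.

-- ===== PORT A =====
def function_bypass_py (payload : String) : String :=
  -- replacements dict iterated in insertion order: UNION, SELECT, AND, OR
  let result := payload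
  let result := PySem.Str.replace result "UNION" "UNION ALL"
  let result := PySem.Str.replace result "SELECT" "SELECT ALL"
  let result := PySem.Str.replace result "AND" "&&"
  let result := PySem.Str.replace result "OR" "||"
  result

-- ===== PORT B =====
-- hand-port of re.sub(r"UNION|SELECT|AND|OR", callback, payload): exact here because the
-- pattern is an alternation of literals — re.sub takes the leftmost match, trying the
-- alternatives in the pattern's order at each position, and copies non-matching chars.
def bypassScan : List Char → List Char
  | [] => []
  | c :: t =>
    if (['U','N','I','O','N'] : List Char).isPrefixOf (c :: t) then
      ['U','N','I','O','N',' ','A','L','L'] ++ bypassScan (t.drop 4)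
    else if (['S','E','L','E','C','T'] : List Char).isPrefixOf (c :: t) then
      ['S','E','L','E','C','T',' ','A','L','L'] ++ bypassScan (t.drop 5)
    else if (['A','N','D'] : List Char).isPrefixOf (c :: t) then
      ['&','&'] ++ bypassScan (t.drop 2)
    else if (['O','R'] : List Char).isPrefixOf (c :: t) then
      ['|','|'] ++ bypassScan (t.drop 1)
    else c :: bypassScan t
termination_by s => s.length
decreasing_by all_goals simp [List.length_drop]


def function_bypass_py_alt (payload : String) : String :=
  String.ofList (bypassScan payload.toList)

-- ===== PRECONDITION & SPEC =====
def Spec_function_bypass_py (payload : String) (out : String) : Prop := out = function_bypass_py_alt payload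
instance (payload : String) (out : String) : Decidable (Spec_function_bypass_py payload out) := by unfold Spec_function_bypass_py; infer_instance

-- ===== CLAIM (what is proved, stated in full; the proofs are below) =====
def Claim_equal_function_bypass_py : Prop := ∀ (payload : String), Dom_function_bypass_py payload → Spec_function_bypass_py payload (function_bypass_py payload)

-- ===== LEMMAS AND PROOFS =====

-- structural characterisation of one str.replace pass (nonempty needle o :: old')
def rep1 (o : Char) (old' new : List Char) : List Char → List Char
  | [] => []
  | c :: t =>
    if (o :: old').isPrefixOf (c :: t) then new ++ rep1 o old' new (t.drop old'.length)
    else c :: rep1 o old' new t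
termination_by s => s.length
decreasing_by all_goals simp [List.length_drop]


theorem repGo (o : Char) (old' new : List Char) :
    ∀ (fuel : Nat) (s acc : List Char), s.length ≤ fuel →
      PySem.Chars.replace.go (o :: old') new fuel s acc = acc.reverse ++ rep1 o old' new s := by
  intro fuel
  induction fuel with
  | zero =>
    intro s acc h
    have hs : s = [] := by cases s with
      | nil => rfl
      | cons a b => simp at h
    subst hs; simp [PySem.Chars.replace.go, rep1]
  | succ n ih =>
    intro s acc h
    cases s with
    | nil => simp [PySem.Chars.replace.go, rep1]
    | cons c t =>
      by_cases hp : (o :: old').isPrefixOf (c :: t)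
      · have hd : (c :: t).drop (o :: old').length = t.drop old'.length := by
          simp
        rw [show PySem.Chars.replace.go (o :: old') new (n+1) (c :: t) acc
              = PySem.Chars.replace.go (o :: old') new n ((c :: t).drop (o :: old').length) (new.reverse ++ acc) by
            simp [PySem.Chars.replace.go, hp]]
        rw [hd, ih _ _ (by simp at h ⊢; omega)]
        rw [show rep1 o old' new (c :: t) = new ++ rep1 o old' new (t.drop old'.length) by
            rw [rep1]; simp [hp]]
        simp
      · rw [show PySem.Chars.replace.go (o :: old') new (n+1) (c :: t) acc
              = PySem.Chars.replace.go (o :: old') new n t (c :: acc) by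
            simp [PySem.Chars.replace.go, hp]]
        rw [ih _ _ (by simp at h; omega)]
        rw [show rep1 o old' new (c :: t) = c :: rep1 o old' new t by rw [rep1]; simp [hp]]
        simp

theorem repEq (o : Char) (old' new : List Char) (s : List Char) :
    PySem.Chars.replace s (o :: old') new = rep1 o old' new s := by
  rw [PySem.Chars.replace]
  simp only [List.isEmpty_cons, if_neg Bool.false_ne_true]
  simpa using repGo o old' new s.length s [] le_rfl

-- a pass whose needle's first char does not occur in p leaves the prefix p untouched
theorem rep1_notMem (o : Char) (old' new : List Char) :
    ∀ (p X : List Char), o ∉ p →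
      rep1 o old' new (p ++ X) = p ++ rep1 o old' new X := by
  intro p
  induction p with
  | nil => intro X _; simp
  | cons d p' ih =>
    intro X hp
    have hne : ¬ (o :: old').isPrefixOf (d :: (p' ++ X)) := by
      intro hc
      simp [List.isPrefixOf_cons₂] at hc
      exact hp (by simp [hc.1])
    rw [List.cons_append, rep1]
    simp only [if_neg hne]
    rw [ih X (fun h => hp (List.mem_cons_of_mem _ h))]
    simp

-- a pass at an occurrence of its needle
theorem rep1_head (o : Char) (old' new X : List Char) :
    rep1 o old' new (o :: (old' ++ X)) = new ++ rep1 o old' new X := by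
  have hp : (o :: old').isPrefixOf (o :: (old' ++ X)) := by
    exact List.isPrefixOf_iff_prefix.mpr (by simp)
  rw [rep1]
  simp [hp]

theorem prefix_take_of_prefix_append :
    ∀ (key d X : List Char), key.isPrefixOf (d ++ X) →
      (d.take key.length).isPrefixOf key := by
  intro key
  induction key with
  | nil => intro d X _; simp
  | cons k key' ih =>
    intro d X h
    cases d with
    | nil => simp
    | cons c d' =>
      simp only [List.cons_append, List.isPrefixOf_cons₂, Bool.and_eq_true, beq_iff_eq] at h
      simp only [List.length_cons, List.take_succ_cons, List.isPrefixOf_cons₂,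
        Bool.and_eq_true, beq_iff_eq]
      exact ⟨h.1.symm, ih d' X h.2⟩

-- a pass passes over q when no tail of q can begin a needle occurrence (checked by decide)
theorem rep1_noStraddle (o : Char) (old' new : List Char) :
    ∀ (q X : List Char),
      (∀ i, i < q.length → ¬ ((q.drop i).take (old'.length + 1)).isPrefixOf (o :: old') = true) →
      rep1 o old' new (q ++ X) = q ++ rep1 o old' new X := by
  intro q
  induction q with
  | nil => intro X _; simp
  | cons d q' ih =>
    intro X H
    have h0 : ¬ (o :: old').isPrefixOf (d :: (q' ++ X)) := by
      intro hc
      have := prefix_take_of_prefix_append (o :: old') (d :: q') X (by simpa using hc)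
      exact H 0 (by simp) (by simpa using this)
    rw [List.cons_append, rep1, if_neg h0]
    rw [ih X (fun i hi => by simpa using H (i + 1) (by simpa using Nat.succ_lt_succ hi))]
    simp

-- a pass creates no new occurrence of p at the front when p avoids the needle's and the
-- replacement's first characters
theorem rep1_prefix_rev (o h : Char) (old' new' : List Char) :
    ∀ (s p : List Char), o ∉ p → h ∉ p →
      p.isPrefixOf (rep1 o old' (h :: new') s) → p.isPrefixOf s := by
  intro s
  induction s with
  | nil => intro p _ _ hp; rw [rep1] at hp; exact hp
  | cons c t ih =>
    intro p ho hh hp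
    by_cases hm : (o :: old').isPrefixOf (c :: t)
    · rw [rep1] at hp
      simp only [if_pos hm] at hp
      cases p with
      | nil => simp
      | cons a p' =>
        exfalso
        simp only [List.cons_append, List.isPrefixOf_cons₂, Bool.and_eq_true, beq_iff_eq] at hp
        exact hh (by simp [hp.1])
    · rw [rep1] at hp
      simp only [if_neg hm] at hp
      cases p with
      | nil => simp
      | cons a p' =>
        simp only [List.isPrefixOf_cons₂, Bool.and_eq_true, beq_iff_eq] at hp ⊢
        exact ⟨hp.1, ih p' (fun x => ho (List.mem_cons_of_mem _ x))
          (fun x => hh (List.mem_cons_of_mem _ x)) hp.2⟩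

-- the four sequential passes equal the single scan
theorem chainEq (s : List Char) :
    rep1 'O' ['R'] ['|','|'] (rep1 'A' ['N','D'] ['&','&']
      (rep1 'S' ['E','L','E','C','T'] ['S','E','L','E','C','T',' ','A','L','L']
        (rep1 'U' ['N','I','O','N'] ['U','N','I','O','N',' ','A','L','L'] s)))
      = bypassScan s := by
  cases s with
  | nil => simp [rep1, bypassScan]
  | cons c t =>
    by_cases hU : (['U','N','I','O','N'] : List Char).isPrefixOf (c :: t)
    · obtain ⟨r, hr⟩ := List.isPrefixOf_iff_prefix.mp hU
      have hlen : r.length < (c :: t).length := by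
        rw [← hr]; simp only [List.length_append, List.length_cons, List.length_nil]; omega
      rw [← hr]
      rw [show (['U','N','I','O','N'] : List Char) ++ r = 'U' :: (['N','I','O','N'] ++ r) from rfl]
      rw [rep1_head]
      rw [rep1_noStraddle 'S' ['E','L','E','C','T'] _ ['U','N','I','O','N',' ','A','L','L'] _ (by decide)]
      rw [rep1_noStraddle 'A' ['N','D'] _ ['U','N','I','O','N',' ','A','L','L'] _ (by decide)]
      rw [rep1_noStraddle 'O' ['R'] _ ['U','N','I','O','N',' ','A','L','L'] _ (by decide)]
      rw [chainEq r]
      conv_rhs => rw [bypassScan]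
      simp
    · by_cases hS : (['S','E','L','E','C','T'] : List Char).isPrefixOf (c :: t)
      · obtain ⟨r, hr⟩ := List.isPrefixOf_iff_prefix.mp hS
        have hlen : r.length < (c :: t).length := by
          rw [← hr]; simp only [List.length_append, List.length_cons, List.length_nil]; omega
        rw [← hr]
        rw [rep1_notMem 'U' ['N','I','O','N'] _ ['S','E','L','E','C','T'] r (by decide)]
        rw [show (['S','E','L','E','C','T'] : List Char) ++ rep1 'U' ['N','I','O','N'] ['U','N','I','O','N',' ','A','L','L'] r
              = 'S' :: (['E','L','E','C','T'] ++ rep1 'U' ['N','I','O','N'] ['U','N','I','O','N',' ','A','L','L'] r) from rfl]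
        rw [rep1_head]
        rw [rep1_noStraddle 'A' ['N','D'] _ ['S','E','L','E','C','T',' ','A','L','L'] _ (by decide)]
        rw [rep1_noStraddle 'O' ['R'] _ ['S','E','L','E','C','T',' ','A','L','L'] _ (by decide)]
        rw [chainEq r]
        conv_rhs => rw [show (['S','E','L','E','C','T'] : List Char) ++ r = 'S' :: (['E','L','E','C','T'] ++ r) from rfl,
          bypassScan]
        simp
      · by_cases hA : (['A','N','D'] : List Char).isPrefixOf (c :: t)
        · obtain ⟨r, hr⟩ := List.isPrefixOf_iff_prefix.mp hA
          have hlen : r.length < (c :: t).length := by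
            rw [← hr]; simp only [List.length_append, List.length_cons, List.length_nil]; omega
          rw [← hr]
          rw [rep1_notMem 'U' ['N','I','O','N'] _ ['A','N','D'] r (by decide)]
          rw [rep1_notMem 'S' ['E','L','E','C','T'] _ ['A','N','D'] _ (by decide)]
          rw [show (['A','N','D'] : List Char) ++ rep1 'S' ['E','L','E','C','T'] ['S','E','L','E','C','T',' ','A','L','L'] (rep1 'U' ['N','I','O','N'] ['U','N','I','O','N',' ','A','L','L'] r)
                = 'A' :: (['N','D'] ++ rep1 'S' ['E','L','E','C','T'] ['S','E','L','E','C','T',' ','A','L','L'] (rep1 'U' ['N','I','O','N'] ['U','N','I','O','N',' ','A','L','L'] r)) from rfl]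
          rw [rep1_head]
          rw [rep1_notMem 'O' ['R'] _ ['&','&'] _ (by decide)]
          rw [chainEq r]
          conv_rhs => rw [show (['A','N','D'] : List Char) ++ r = 'A' :: (['N','D'] ++ r) from rfl, bypassScan]
          simp
        · by_cases hO : (['O','R'] : List Char).isPrefixOf (c :: t)
          · obtain ⟨r, hr⟩ := List.isPrefixOf_iff_prefix.mp hO
            have hlen : r.length < (c :: t).length := by
              rw [← hr]; simp only [List.length_append, List.length_cons, List.length_nil]; omega
            rw [← hr]
            rw [rep1_notMem 'U' ['N','I','O','N'] _ ['O','R'] r (by decide)]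
            rw [rep1_notMem 'S' ['E','L','E','C','T'] _ ['O','R'] _ (by decide)]
            rw [rep1_notMem 'A' ['N','D'] _ ['O','R'] _ (by decide)]
            rw [show (['O','R'] : List Char) ++ rep1 'A' ['N','D'] ['&','&'] (rep1 'S' ['E','L','E','C','T'] ['S','E','L','E','C','T',' ','A','L','L'] (rep1 'U' ['N','I','O','N'] ['U','N','I','O','N',' ','A','L','L'] r))
                  = 'O' :: (['R'] ++ rep1 'A' ['N','D'] ['&','&'] (rep1 'S' ['E','L','E','C','T'] ['S','E','L','E','C','T',' ','A','L','L'] (rep1 'U' ['N','I','O','N'] ['U','N','I','O','N',' ','A','L','L'] r))) from rfl]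
            rw [rep1_head]
            rw [chainEq r]
            conv_rhs => rw [show (['O','R'] : List Char) ++ r = 'O' :: (['R'] ++ r) from rfl, bypassScan]
            simp
          · -- no keyword starts at this position: every pass copies the head character
            have e1 : rep1 'U' ['N','I','O','N'] ['U','N','I','O','N',' ','A','L','L'] (c :: t)
                = c :: rep1 'U' ['N','I','O','N'] ['U','N','I','O','N',' ','A','L','L'] t := by
              rw [rep1]; simp [hU]
            have hS' : ¬ (['S','E','L','E','C','T'] : List Char).isPrefixOf
                (rep1 'U' ['N','I','O','N'] ['U','N','I','O','N',' ','A','L','L'] (c :: t)) := by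
              intro hc
              exact hS (rep1_prefix_rev 'U' 'U' ['N','I','O','N'] ['N','I','O','N',' ','A','L','L']
                (c :: t) ['S','E','L','E','C','T'] (by decide) (by decide) hc)
            have e2 : rep1 'S' ['E','L','E','C','T'] ['S','E','L','E','C','T',' ','A','L','L']
                  (rep1 'U' ['N','I','O','N'] ['U','N','I','O','N',' ','A','L','L'] (c :: t))
                = c :: rep1 'S' ['E','L','E','C','T'] ['S','E','L','E','C','T',' ','A','L','L']
                  (rep1 'U' ['N','I','O','N'] ['U','N','I','O','N',' ','A','L','L'] t) := by
              rw [e1] at hS' ⊢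
              rw [rep1]; simp [hS']
            have hA' : ¬ (['A','N','D'] : List Char).isPrefixOf
                (rep1 'S' ['E','L','E','C','T'] ['S','E','L','E','C','T',' ','A','L','L']
                  (rep1 'U' ['N','I','O','N'] ['U','N','I','O','N',' ','A','L','L'] (c :: t))) := by
              intro hc
              have h1 := rep1_prefix_rev 'S' 'S' ['E','L','E','C','T'] ['E','L','E','C','T',' ','A','L','L']
                _ ['A','N','D'] (by decide) (by decide) hc
              exact hA (rep1_prefix_rev 'U' 'U' ['N','I','O','N'] ['N','I','O','N',' ','A','L','L']
                (c :: t) ['A','N','D'] (by decide) (by decide) h1)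
            have e3 : rep1 'A' ['N','D'] ['&','&']
                  (rep1 'S' ['E','L','E','C','T'] ['S','E','L','E','C','T',' ','A','L','L']
                    (rep1 'U' ['N','I','O','N'] ['U','N','I','O','N',' ','A','L','L'] (c :: t)))
                = c :: rep1 'A' ['N','D'] ['&','&']
                  (rep1 'S' ['E','L','E','C','T'] ['S','E','L','E','C','T',' ','A','L','L']
                    (rep1 'U' ['N','I','O','N'] ['U','N','I','O','N',' ','A','L','L'] t)) := by
              rw [e2] at hA' ⊢
              rw [rep1]; simp [hA']
            have hO' : ¬ (['O','R'] : List Char).isPrefixOf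
                (rep1 'A' ['N','D'] ['&','&']
                  (rep1 'S' ['E','L','E','C','T'] ['S','E','L','E','C','T',' ','A','L','L']
                    (rep1 'U' ['N','I','O','N'] ['U','N','I','O','N',' ','A','L','L'] (c :: t)))) := by
              intro hc
              have h1 := rep1_prefix_rev 'A' '&' ['N','D'] ['&'] _ ['O','R'] (by decide) (by decide) hc
              have h2 := rep1_prefix_rev 'S' 'S' ['E','L','E','C','T'] ['E','L','E','C','T',' ','A','L','L']
                _ ['O','R'] (by decide) (by decide) h1
              exact hO (rep1_prefix_rev 'U' 'U' ['N','I','O','N'] ['N','I','O','N',' ','A','L','L']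
                (c :: t) ['O','R'] (by decide) (by decide) h2)
            have e4 : rep1 'O' ['R'] ['|','|']
                  (rep1 'A' ['N','D'] ['&','&']
                    (rep1 'S' ['E','L','E','C','T'] ['S','E','L','E','C','T',' ','A','L','L']
                      (rep1 'U' ['N','I','O','N'] ['U','N','I','O','N',' ','A','L','L'] (c :: t))))
                = c :: rep1 'O' ['R'] ['|','|']
                  (rep1 'A' ['N','D'] ['&','&']
                    (rep1 'S' ['E','L','E','C','T'] ['S','E','L','E','C','T',' ','A','L','L']
                      (rep1 'U' ['N','I','O','N'] ['U','N','I','O','N',' ','A','L','L'] t))) := by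
              rw [e3] at hO' ⊢
              rw [rep1]; simp [hO']
            rw [e4, chainEq t]
            conv_rhs => rw [bypassScan]
            simp [hU, hS, hA, hO]
termination_by s.length
decreasing_by all_goals first
  | exact hlen
  | (simp only [List.length_cons]; omega)

-- ===== VERDICT (by name: the statement is the Claim_ definition above) =====
theorem function_bypass_py_spec : Claim_equal_function_bypass_py := by
  intro payload _
  unfold Spec_function_bypass_py function_bypass_py function_bypass_py_alt
  simp only [PySem.Str.replace, String.toList_ofList]
  rw [show ("UNION" : String).toList = ['U','N','I','O','N'] from rfl,
    show ("UNION ALL" : String).toList = ['U','N','I','O','N',' ','A','L','L'] from rfl,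
    show ("SELECT" : String).toList = ['S','E','L','E','C','T'] from rfl,
    show ("SELECT ALL" : String).toList = ['S','E','L','E','C','T',' ','A','L','L'] from rfl,
    show ("AND" : String).toList = ['A','N','D'] from rfl,
    show ("OR" : String).toList = ['O','R'] from rfl,
    show ("&&" : String).toList = ['&','&'] from rfl,
    show ("||" : String).toList = ['|','|'] from rfl]
  rw [repEq, repEq, repEq, repEq]
  exact congrArg String.ofList (chainEq payload.toList)
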